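-- pv_equiv track=rewrite | github.com/BenLiang11/Program-Assignments | list_prac.py | organize_list
-- ===== SOURCE A (Python) =====
-- def organize_list(list1):
--     for index in range(len(list1)-1):
--         if list1[index] >= list1[index + 1]:
--             continue
--         else:
--             x = list1[index]
--             list1.pop(index)
--             list1.append(x)
--     return list1
--     return "done"
-- ===== SOURCE B (Python) =====
-- def organize_list(list1):
--     # Queue simulation with a head index instead of pop-at-index: each step is O(1).
--     # Mutates list1 in place (like A) and returns it.
--     n = len(list1)
--     if n == 0:
--         return list1
--     out = []
--     rest = list(list1)
--     h = 0
--     for _ in range(n - 1):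
--         a = rest[h]
--         b = rest[h + 1]
--         if a >= b:
--             out.append(a)
--             h += 1
--         else:
--             rest.append(a)
--             out.append(b)
--             h += 2
--     out.append(rest[h])
--     list1[:] = out
--     return list1
-- ===== Notes on version B (the rewrite author's own statement) =====
-- stated objective: alternative
-- what changed: Replaces the in-place pop(index)/append loop (each pop shifts the tail) by a single-pass queue simulation with a head index: each step inspects the two front queue elements and either keeps one or recycles one to the back in O(1).
import Mathlib
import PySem

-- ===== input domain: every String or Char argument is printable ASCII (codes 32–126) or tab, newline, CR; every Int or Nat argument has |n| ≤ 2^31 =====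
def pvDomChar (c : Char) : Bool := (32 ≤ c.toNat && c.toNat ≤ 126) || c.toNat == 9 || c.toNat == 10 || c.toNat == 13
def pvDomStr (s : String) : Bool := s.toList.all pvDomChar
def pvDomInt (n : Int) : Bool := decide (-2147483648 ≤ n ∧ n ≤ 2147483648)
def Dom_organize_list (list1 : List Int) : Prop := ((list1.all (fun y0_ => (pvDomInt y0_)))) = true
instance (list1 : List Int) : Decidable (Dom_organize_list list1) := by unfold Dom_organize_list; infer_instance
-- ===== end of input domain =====

-- B replaces A's in-place pop(index)/append loop by a one-pass queue simulation with a head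
-- index (objective: alternative algorithm); equivalence is about the return value, and B
-- performs the same in-place mutation of list1 as A.


-- ===== PORT A =====
-- one loop-body step of A at index `index` (indices are always in range, so the
-- `none` fallbacks are unreachable)
def pvStepA (l : List Int) (index : Int) : List Int :=
  match PySem.List.pyGet? l index, PySem.List.pyGet? l (index + 1) with
  | some a, some b =>
    if a ≥ b then l
    else
      match PySem.List.pop? l index with
      | some p => p.2 ++ [a]      -- list1.pop(index); list1.append(x)
      | none => l                  -- unreachable
  | _, _ => l                      -- unreachable

def organize_list (list1 : List Int) : List Int :=
  (PySem.List.pyRange 0 ((list1.length : Int) - 1) 1).foldl pvStepA list1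

-- ===== PORT B =====
-- one loop-body step of B on state (out, rest, h); indices h, h+1 are always in range
def pvStepB (s : List Int × List Int × Nat) : List Int × List Int × Nat :=
  match s with
  | (out, rest, h) =>
    match PySem.List.pyGet? rest (h : Int), PySem.List.pyGet? rest ((h : Int) + 1) with
    | some a, some b =>
      if a ≥ b then (out ++ [a], rest, h + 1)
      else (out ++ [b], rest ++ [a], h + 2)
    | _, _ => s                    -- unreachable

def organize_list_alt (list1 : List Int) : List Int :=
  let n := list1.length
  if n = 0 then list1
  else
    let s := (PySem.List.pyRange 0 ((n : Int) - 1) 1).foldl (fun s _ => pvStepB s) ([], list1, 0)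
    match PySem.List.pyGet? s.2.1 (s.2.2 : Int) with
    | some v => s.1 ++ [v]
    | none => s.1                  -- unreachable

-- ===== PRECONDITION & SPEC =====
def Spec_organize_list (list1 : List Int) (out : List Int) : Prop := out = organize_list_alt list1
instance (list1 : List Int) (out : List Int) : Decidable (Spec_organize_list list1 out) := by unfold Spec_organize_list; infer_instance

-- ===== CLAIM (what is proved, stated in full; the proofs are below) =====
def Claim_equal_organize_list : Prop := ∀ (list1 : List Int), Dom_organize_list list1 → Spec_organize_list list1 (organize_list list1)

-- ===== LEMMAS AND PROOFS =====

-- Invariant: after k loop steps, A's list is B's kept prefix ++ B's pending queue.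
lemma pv_inv (list1 : List Int) : ∀ (k : Nat), k + 1 ≤ list1.length →
    ∃ out rest h,
      (PySem.List.pyRange 0 (k : Int) 1).foldl (fun s _ => pvStepB s) ([], list1, 0) = (out, rest, h) ∧
      (PySem.List.pyRange 0 (k : Int) 1).foldl pvStepA list1 = out ++ rest.drop h ∧
      out.length = k ∧ h + (list1.length - k) = rest.length := by
  intro k
  induction k with
  | zero =>
    intro _
    refine ⟨[], list1, 0, ?_, ?_, rfl, by omega⟩ <;>
      simp [PySem.List.pyRange_one_eq_nil (by omega : (0:Int) ≤ 0)]
  | succ k ih =>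
    intro hk1
    obtain ⟨out, rest, h, hB, hA, hlen, hrest⟩ := ih (by omega)
    have hr : PySem.List.pyRange 0 ((k + 1 : Nat) : Int) 1 =
        PySem.List.pyRange 0 (k : Nat) 1 ++ [(k : Int)] := by
      push_cast
      exact PySem.List.pyRange_one_succ_right (by positivity)
    rw [hr, List.foldl_append, List.foldl_append, hB, hA]
    simp only [List.foldl_cons, List.foldl_nil]
    have hq2 : 2 ≤ (rest.drop h).length := by simp; omega
    rcases e : rest.drop h with _ | ⟨a, t⟩
    · rw [e] at hq2; simp at hq2
    rcases t with _ | ⟨b, q'⟩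
    · rw [e] at hq2; simp at hq2
    rw [e] at hA hq2
    have hga : rest[h]? = some a := by
      have := @List.getElem?_drop Int rest h 0
      rw [e] at this; simpa using this.symm
    have hgb : rest[h+1]? = some b := by
      have := @List.getElem?_drop Int rest h 1
      rw [e] at this; simpa using this.symm
    have hd1 : rest.drop (h + 1) = b :: q' := by
      rw [show h + 1 = h + 1 from rfl, ← List.drop_drop, e]; rfl
    have hd2 : rest.drop (h + 2) = q' := by
      rw [← List.drop_drop, e]; rfl
    -- evaluate pvStepB
    have hsB : pvStepB (out, rest, h) =
        (if a ≥ b then (out ++ [a], rest, h + 1) else (out ++ [b], rest ++ [a], h + 2)) := by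
      have g1 : PySem.List.pyGet? rest (h : Int) = some a := by
        rw [PySem.List.pyGet?_natCast]; exact hga
      have g2 : PySem.List.pyGet? rest ((h : Int) + 1) = some b := by
        rw [show ((h : Int) + 1) = ((h + 1 : Nat) : Int) by push_cast; ring,
          PySem.List.pyGet?_natCast]; exact hgb
      simp [pvStepB, g1, g2]
    -- evaluate pvStepA on out ++ a :: b :: q' at index k = out.length
    have hkcast : (k : Int) = (out.length : Int) := by exact_mod_cast hlen.symm
    have g1 : PySem.List.pyGet? (out ++ a :: b :: q') (k : Int) = some a := by
      rw [hkcast]; exact PySem.List.pyGet?_append_length out _ a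
    have g2 : PySem.List.pyGet? (out ++ a :: b :: q') ((k : Int) + 1) = some b := by
      rw [hkcast, show ((out.length : Int) + 1) = ((out.length : Int) + ((1 : Nat) : Int)) by
        push_cast; ring, PySem.List.pyGet?_append_right]
      rfl
    by_cases hab : a ≥ b
    · -- keep: A leaves the list, B moves a to out
      refine ⟨out ++ [a], rest, h + 1, ?_, ?_, by simp [hlen], by omega⟩
      · rw [hsB, if_pos hab]
      · simp [pvStepA, g1, g2, hab, hd1]
    · -- recycle: A pops index k and appends a; B keeps b and sends a to the back
      have hlt : out.length < (out ++ a :: b :: q').length := by simp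
      have hpop : PySem.List.pop? (out ++ a :: b :: q') (k : Int) =
          some ((out ++ a :: b :: q')[out.length], (out ++ a :: b :: q').eraseIdx out.length) := by
        rw [hkcast]; exact PySem.List.pop?_natCast _ _ hlt
      have herase : (out ++ a :: b :: q').eraseIdx out.length = out ++ b :: q' := by
        rw [List.eraseIdx_append_of_length_le (Nat.le_refl _)]; simp
      refine ⟨out ++ [b], rest ++ [a], h + 2, ?_, ?_, by simp [hlen], by simp; omega⟩
      · rw [hsB, if_neg hab]
      · have hdp : (rest ++ [a]).drop (h + 2) = q' ++ [a] := by
          rw [List.drop_append_of_le_length (by omega), hd2]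
        simp [pvStepA, g1, g2, hab, hpop, herase, hdp]

-- ===== VERDICT (by name: the statement is the Claim_ definition above) =====
theorem organize_list_spec : Claim_equal_organize_list := by
  intro list1 _
  unfold Spec_organize_list organize_list organize_list_alt
  by_cases hn : list1.length = 0
  · simp [hn]
  · obtain ⟨out, rest, h, hB, hA, hlen, hrest⟩ := pv_inv list1 (list1.length - 1) (by omega)
    have hcast : ((list1.length : Int) - 1) = ((list1.length - 1 : Nat) : Int) := by omega
    have h1 : (rest.drop h).length = 1 := by simp; omega
    rcases e : rest.drop h with _ | ⟨v, t⟩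
    · rw [e] at h1; simp at h1
    rcases t with _ | ⟨w, t⟩
    · have hgv : PySem.List.pyGet? rest (h : Int) = some v := by
        rw [PySem.List.pyGet?_natCast]
        have := @List.getElem?_drop Int rest h 0
        rw [e] at this; simpa using this.symm
      simp only [hn, hcast, hB, hA, e]
      simp [hgv]
    · rw [e] at h1; simp at h1
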